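-- pv_equiv track=rewrite | github.com/vallmeister/Programming | src/leetcode/2832_maximal_range_that_each_element_is_maximum_in_it.py | maximumLengthOfRanges
-- ===== SOURCE A (Python) =====
-- from typing import List
--
-- def maximumLengthOfRanges(nums: List[int]) -> List[int]:
--     n = len(nums)
--     next_greater = [n] * n
--     prev_grater = [-1] * n
--
--     mono_stack = []
--     for i in range(n):
--         while mono_stack and nums[i] > nums[mono_stack[-1]]:
--             next_greater[mono_stack.pop()] = i
--         mono_stack.append(i)
--
--     mono_stack = []
--     for i in reversed(range(n)):
--         while mono_stack and nums[i] > nums[mono_stack[-1]]: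
--             prev_grater[mono_stack.pop()] = i
--         mono_stack.append(i)
--
--     return [next_greater[i] - prev_grater[i] - 1 for i in range(n)]
-- ===== SOURCE B (Python) =====
-- from typing import List
--
-- def maximumLengthOfRanges(nums: List[int]) -> List[int]:
--     n = len(nums)
--     prev = [-1] * n
--     for i in range(n):
--         j = i - 1
--         while j >= 0 and nums[j] <= nums[i]:
--             j = prev[j]
--         prev[i] = j
--     nxt = [n] * n
--     for i in range(n - 1, -1, -1):
--         j = i + 1
--         while j < n and nums[j] <= nums[i]:
--             j = nxt[j]
--         nxt[i] = j
--     return [nxt[i] - prev[i] - 1 for i in range(n)]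
-- ===== Notes on version B (the rewrite author's own statement) =====
-- stated objective: alternative
-- what changed: Replaces the two monotonic-stack passes with stack-free jump-pointer passes that compute each prev/next-greater entry by chasing the already-computed entries of the result array itself.
import Mathlib
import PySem

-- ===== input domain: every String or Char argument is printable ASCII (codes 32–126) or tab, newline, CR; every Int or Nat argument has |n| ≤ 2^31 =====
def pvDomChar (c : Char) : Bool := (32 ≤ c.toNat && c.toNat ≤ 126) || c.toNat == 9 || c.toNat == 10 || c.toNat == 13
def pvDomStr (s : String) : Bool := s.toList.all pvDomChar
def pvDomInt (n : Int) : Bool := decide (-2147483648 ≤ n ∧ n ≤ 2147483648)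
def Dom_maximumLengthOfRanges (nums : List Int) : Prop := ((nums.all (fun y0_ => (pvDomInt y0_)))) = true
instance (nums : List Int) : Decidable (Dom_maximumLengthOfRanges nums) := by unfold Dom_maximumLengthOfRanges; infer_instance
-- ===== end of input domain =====

-- B replaces A's two monotonic-stack passes by stack-free jump-pointer passes that chase the
-- already-computed prev/next-greater entries (objective: alternative; same return value).

-- ===== PORT A =====
-- inner while loop of both passes: `while mono_stack and nums[i] > nums[mono_stack[-1]]: arr[mono_stack.pop()] = i`
-- (the stack is held head-first: the list head is Python's stack top mono_stack[-1])
def pvPop (nums : List Int) (i : Nat) : List Int → List Nat → List Int × List Nat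
  | arr, [] => (arr, [])
  | arr, t :: rest =>
    if nums.getD t 0 < nums.getD i 0 then pvPop nums i (arr.set t (i : Int)) rest
    else (arr, t :: rest)

-- one iteration of either pass: run the while loop, then `mono_stack.append(i)`
def pvStep (nums : List Int) (s : List Int × List Nat) (i : Nat) : List Int × List Nat :=
  let s' := pvPop nums i s.1 s.2
  (s'.1, i :: s'.2)

def maximumLengthOfRanges (nums : List Int) : List Int :=
  let n := nums.length
  let s1 := (List.range n).foldl (pvStep nums) (List.replicate n (n : Int), [])
  let s2 := ((List.range n).reverse).foldl (pvStep nums) (List.replicate n (-1 : Int), [])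
  (List.range n).map (fun i => s1.1.getD i 0 - s2.1.getD i 0 - 1)


-- ===== PORT B =====
-- `j = i-1; while j >= 0 and nums[j] <= nums[i]: j = prev[j]` and its mirror
-- `j = i+1; while j < n and nums[j] <= nums[i]: j = nxt[j]`; the fuel argument only
-- makes the recursion total (it is never exhausted on the proved domain)
def jumpPrev (nums prev : List Int) (vi : Int) (x : Int) (fuel : Nat) : Int :=
  match fuel with
  | 0 => x
  | f + 1 =>
    if 0 ≤ x ∧ nums.getD x.toNat 0 ≤ vi then jumpPrev nums prev vi (prev.getD x.toNat 0) f else x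

def jumpNext (nums nxt : List Int) (vi : Int) (x : Int) (fuel : Nat) : Int :=
  match fuel with
  | 0 => x
  | f + 1 =>
    if x < (nums.length : Int) ∧ nums.getD x.toNat 0 ≤ vi then
      jumpNext nums nxt vi (nxt.getD x.toNat 0) f
    else x

def pvStepPrev (nums prev : List Int) (i : Nat) : List Int :=
  prev.set i (jumpPrev nums prev (nums.getD i 0) ((i : Int) - 1) (nums.length + 1))

def pvStepNext (nums nxt : List Int) (i : Nat) : List Int :=
  nxt.set i (jumpNext nums nxt (nums.getD i 0) ((i : Int) + 1) (nums.length + 1))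

def maximumLengthOfRanges_alt (nums : List Int) : List Int :=
  let n := nums.length
  let prev := (List.range n).foldl (pvStepPrev nums) (List.replicate n (-1 : Int))
  let nxt := ((List.range n).reverse).foldl (pvStepNext nums) (List.replicate n (n : Int))
  (List.range n).map (fun i => nxt.getD i 0 - prev.getD i 0 - 1)


-- ===== PRECONDITION & SPEC =====
def Spec_maximumLengthOfRanges (nums : List Int) (out : List Int) : Prop := out = maximumLengthOfRanges_alt nums
instance (nums : List Int) (out : List Int) : Decidable (Spec_maximumLengthOfRanges nums out) := by unfold Spec_maximumLengthOfRanges; infer_instance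

-- ===== CLAIM (what is proved, stated in full; the proofs are below) =====
def Claim_equal_maximumLengthOfRanges : Prop := ∀ (nums : List Int), Dom_maximumLengthOfRanges nums → Spec_maximumLengthOfRanges nums (maximumLengthOfRanges nums)

-- ===== LEMMAS AND PROOFS =====

def pvNgB (nums : List Int) (vi : Int) (k b : Nat) : Nat :=
  if k < b then (if vi < nums.getD k 0 then k else pvNgB nums vi (k + 1) b)
  else nums.length
termination_by b - k

def pvPgB (nums : List Int) (vi : Int) : Nat → Nat → Int
  | 0, _ => -1
  | (k + 1), b => if b ≤ k then (if vi < nums.getD k 0 then (k : Int) else pvPgB nums vi k b) else -1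

theorem pvNgB_of_ge (nums : List Int) (vi : Int) (k b : Nat) (h : b ≤ k) :
    pvNgB nums vi k b = nums.length := by
  unfold pvNgB; rw [if_neg (by omega)]

theorem pvNgB_mem (nums : List Int) (vi : Int) (k b : Nat) :
    pvNgB nums vi k b = nums.length ∨
      (k ≤ pvNgB nums vi k b ∧ pvNgB nums vi k b < b ∧ vi < nums.getD (pvNgB nums vi k b) 0) := by
  fun_induction pvNgB nums vi k b with
  | case1 k hkb hv => right; exact ⟨le_refl _, hkb, hv⟩
  | case2 k hkb hv ih =>
    rcases ih with h | ⟨h1, h2, h3⟩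
    · left; exact h
    · right; exact ⟨by omega, h2, h3⟩
  | case3 k hkb => left; rfl

theorem pvNgB_window (nums : List Int) (vi : Int) (k b : Nat) :
    ∀ m, k ≤ m → m < b → m < pvNgB nums vi k b → nums.getD m 0 ≤ vi := by
  fun_induction pvNgB nums vi k b with
  | case1 k hkb hv => intro m h1 h2 h3; omega
  | case2 k hkb hv ih =>
    intro m h1 h2 h3
    rcases Nat.eq_or_lt_of_le h1 with rfl | h1'
    · exact le_of_not_gt hv
    · exact ih m h1' h2 h3
  | case3 k hkb => intro m h1 h2 h3; omega

theorem pvNgB_none (nums : List Int) (vi : Int) (k b : Nat)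
    (h : ∀ m, k ≤ m → m < b → nums.getD m 0 ≤ vi) : pvNgB nums vi k b = nums.length := by
  fun_induction pvNgB nums vi k b with
  | case1 k hkb hv => exact absurd (h k (le_refl _) hkb) (not_le.mpr hv)
  | case2 k hkb hv ih => exact ih (fun m h1 h2 => h m (by omega) h2)
  | case3 k hkb => rfl

theorem pvNgB_succ (nums : List Int) (vi : Int) (k b : Nat) (hb : b ≤ nums.length) (hk : k ≤ b) :
    pvNgB nums vi k (b + 1) =
      if pvNgB nums vi k b = nums.length then (if vi < nums.getD b 0 then b else nums.length)
      else pvNgB nums vi k b := by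
  have H : ∀ d k, k ≤ b → b - k = d →
      pvNgB nums vi k (b + 1) =
        if pvNgB nums vi k b = nums.length then (if vi < nums.getD b 0 then b else nums.length)
        else pvNgB nums vi k b := by
    intro d
    induction d with
    | zero =>
      intro k hk hbk
      have hkb : k = b := by omega
      subst hkb
      rw [pvNgB_of_ge nums vi k k (le_refl k), if_pos rfl]
      rw [pvNgB, if_pos (by omega), pvNgB_of_ge nums vi (k+1) (k+1) (le_refl _)]
    | succ d ih =>
      intro k hk hbk
      have hkb : k < b := by omega
      have hL : pvNgB nums vi k (b + 1) =
          if vi < nums.getD k 0 then k else pvNgB nums vi (k + 1) (b + 1) := by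
        rw [pvNgB, if_pos (by omega)]
      have hR : pvNgB nums vi k b =
          if vi < nums.getD k 0 then k else pvNgB nums vi (k + 1) b := by
        rw [pvNgB, if_pos (by omega)]
      rw [hL, hR]
      by_cases hv : vi < nums.getD k 0
      · simp only [if_pos hv]
        rw [if_neg (by omega)]
      · simp only [if_neg hv]
        exact ih (k + 1) (by omega) (by omega)
  exact H (b - k) k hk rfl

theorem pvNgB_found (nums : List Int) (vi : Int) (k b : Nat)
    (h : ∀ m, k ≤ m → m < b → nums.getD m 0 ≤ vi) (hk : k ≤ b) (hb : b ≤ nums.length)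
    (hv : vi < nums.getD b 0) : pvNgB nums vi k (b + 1) = b := by
  rw [pvNgB_succ nums vi k b hb hk, if_pos (pvNgB_none nums vi k b h), if_pos hv]

theorem pvNgB_uniq_found (nums : List Int) (vi : Int) (k b x : Nat) (hb : b ≤ nums.length)
    (hk : k ≤ x) (hx : x < b) (hv : vi < nums.getD x 0)
    (h : ∀ m, k ≤ m → m < x → nums.getD m 0 ≤ vi) :
    pvNgB nums vi k b = x := by
  rcases pvNgB_mem nums vi k b with hm | ⟨h1, h2, h3⟩
  · exfalso
    exact absurd (pvNgB_window nums vi k b x hk hx (by omega)) (not_le.mpr hv)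
  · rcases Nat.lt_trichotomy (pvNgB nums vi k b) x with hlt | heq | hgt
    · exact absurd (h _ h1 hlt) (not_le.mpr h3)
    · exact heq
    · exact absurd (pvNgB_window nums vi k b x hk hx hgt) (not_le.mpr hv)

theorem pvPgB_of_le (nums : List Int) (vi : Int) (k b : Nat) (h : k ≤ b) :
    pvPgB nums vi k b = -1 := by
  cases k with
  | zero => rfl
  | succ m => unfold pvPgB; rw [if_neg (by omega)]

theorem pvPgB_lt (nums : List Int) (vi : Int) (k b : Nat) : pvPgB nums vi k b < (k : Int) := by
  induction k with
  | zero => simp [pvPgB]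
  | succ m ih =>
    unfold pvPgB
    split
    · split
      · push_cast; omega
      · have := ih; omega
    · push_cast; omega

theorem pvPgB_neg_one_le (nums : List Int) (vi : Int) (k b : Nat) : -1 ≤ pvPgB nums vi k b := by
  induction k with
  | zero => simp [pvPgB]
  | succ m ih =>
    unfold pvPgB
    split
    · split
      · omega
      · exact ih
    · omega

theorem pvPgB_mem (nums : List Int) (vi : Int) (k b : Nat) :
    pvPgB nums vi k b = -1 ∨
      (0 ≤ pvPgB nums vi k b ∧ b ≤ (pvPgB nums vi k b).toNat ∧ pvPgB nums vi k b < (k : Int) ∧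
        vi < nums.getD (pvPgB nums vi k b).toNat 0) := by
  induction k with
  | zero => left; rfl
  | succ m ih =>
    unfold pvPgB
    split
    · split
      · right
        refine ⟨by omega, by simp; omega, by omega, by simpa using ‹vi < nums.getD m 0›⟩
      · rcases ih with h | ⟨h1, h2, h3, h4⟩
        · left; exact h
        · right; exact ⟨h1, h2, by omega, h4⟩
    · left; rfl

theorem pvPgB_window (nums : List Int) (vi : Int) (k b : Nat) :
    ∀ m : Nat, b ≤ m → m < k → pvPgB nums vi k b < (m : Int) → nums.getD m 0 ≤ vi := by
  induction k with
  | zero => intro m h1 h2; omega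
  | succ n ih =>
    intro m h1 h2 h3
    unfold pvPgB at h3
    rcases Nat.lt_or_ge m n with hm | hm
    · rw [if_pos (by omega)] at h3
      split at h3
      · omega
      · exact ih m h1 hm h3
    · have : m = n := by omega
      subst this
      rw [if_pos h1] at h3
      split at h3
      · omega
      · exact le_of_not_gt ‹¬ vi < nums.getD m 0›

theorem pvPgB_none (nums : List Int) (vi : Int) (k b : Nat)
    (h : ∀ m, b ≤ m → m < k → nums.getD m 0 ≤ vi) : pvPgB nums vi k b = -1 := by
  induction k with
  | zero => rfl
  | succ n ih =>
    unfold pvPgB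
    split
    · rw [if_neg (not_lt.mpr (h n ‹b ≤ n› (by omega)))]
      exact ih (fun m h1 h2 => h m h1 (by omega))
    · rfl

theorem pvPgB_pred (nums : List Int) (vi : Int) (k b : Nat) :
    pvPgB nums vi k b =
      if pvPgB nums vi k (b + 1) = -1 then
        (if b < k ∧ vi < nums.getD b 0 then (b : Int) else -1)
      else pvPgB nums vi k (b + 1) := by
  induction k with
  | zero => simp [pvPgB]
  | succ n ih =>
    rcases Nat.lt_or_ge n b with hn | hn
    · rw [pvPgB_of_le nums vi (n+1) b (by omega), pvPgB_of_le nums vi (n+1) (b+1) (by omega)]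
      rw [if_pos rfl, if_neg (by omega)]
    · rcases Nat.eq_or_lt_of_le hn with heq | hn'
      · subst heq
        have hl : pvPgB nums vi (b+1) b =
            if vi < nums.getD b 0 then (b : Int) else pvPgB nums vi b b := by
          conv_lhs => rw [pvPgB]
          rw [if_pos (le_refl b)]
        rw [hl, pvPgB_of_le nums vi b b (le_refl b),
          pvPgB_of_le nums vi (b+1) (b+1) (le_refl _), if_pos rfl]
        by_cases hv : vi < nums.getD b 0
        · rw [if_pos hv, if_pos ⟨by omega, hv⟩]
        · rw [if_neg hv, if_neg (by rintro ⟨-, h⟩; exact hv h)]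
      · have hl : pvPgB nums vi (n+1) b =
            if vi < nums.getD n 0 then (n : Int) else pvPgB nums vi n b := by
          conv_lhs => rw [pvPgB]
          rw [if_pos hn]
        have hr : pvPgB nums vi (n+1) (b+1) =
            if vi < nums.getD n 0 then (n : Int) else pvPgB nums vi n (b+1) := by
          conv_lhs => rw [pvPgB]
          rw [if_pos (by omega)]
        rw [hl, hr]
        by_cases hv : vi < nums.getD n 0
        · simp only [if_pos hv]
          rw [if_neg (by omega)]
        · simp only [if_neg hv]
          rw [ih]
          by_cases hnull : pvPgB nums vi n (b+1) = -1
          · simp only [if_pos hnull]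
            by_cases hvb : vi < nums.getD b 0
            · rw [if_pos ⟨hn', hvb⟩, if_pos ⟨by omega, hvb⟩]
            · rw [if_neg (by rintro ⟨-, h⟩; exact hvb h),
                if_neg (by rintro ⟨-, h⟩; exact hvb h)]
          · simp only [if_neg hnull]

theorem pvPgB_found (nums : List Int) (vi : Int) (k b : Nat)
    (h : ∀ m, b + 1 ≤ m → m < k → nums.getD m 0 ≤ vi) (hb : b < k) (hv : vi < nums.getD b 0) :
    pvPgB nums vi k b = (b : Int) := by
  rw [pvPgB_pred nums vi k b, if_pos (pvPgB_none nums vi k (b + 1) h), if_pos ⟨hb, hv⟩]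

theorem pvPgB_uniq_found (nums : List Int) (vi : Int) (k b x : Nat) (hb : b ≤ x) (hx : x < k)
    (hv : vi < nums.getD x 0) (h : ∀ m, x < m → m < k → nums.getD m 0 ≤ vi) :
    pvPgB nums vi k b = (x : Int) := by
  rcases pvPgB_mem nums vi k b with hm | ⟨h1, h2, h3, h4⟩
  · exfalso
    exact absurd (pvPgB_window nums vi k b x hb hx (by omega)) (not_le.mpr hv)
  · rcases Int.lt_trichotomy (pvPgB nums vi k b) (x : Int) with hlt | heq | hgt
    · exact absurd (pvPgB_window nums vi k b x hb hx hlt) (not_le.mpr hv)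
    · exact heq
    · exfalso
      have hxm : x < (pvPgB nums vi k b).toNat := by omega
      have hmk : (pvPgB nums vi k b).toNat < k := by omega
      exact absurd (h _ hxm hmk) (not_le.mpr h4)

theorem pvGetD_set_self (l : List Int) (t : Nat) (x : Int) (h : t < l.length) :
    (l.set t x).getD t 0 = x := by
  simp [List.getD_eq_getElem?_getD, h]

theorem pvGetD_set_ne (l : List Int) (t j : Nat) (x : Int) (h : j ≠ t) :
    (l.set t x).getD j 0 = l.getD j 0 := by
  simp [List.getD_eq_getElem?_getD, List.getElem?_set_ne (by omega : t ≠ j)]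

theorem pvPop_spec (nums : List Int) (i : Nat) :
    ∀ (st : List Nat) (arr : List Int),
      List.Pairwise (fun a b => a ≠ b ∧ nums.getD a 0 ≤ nums.getD b 0) st →
      (∀ t ∈ st, t < arr.length) →
      (pvPop nums i arr st).2 = st.filter (fun j => decide (nums.getD i 0 ≤ nums.getD j 0)) ∧
      (pvPop nums i arr st).1.length = arr.length ∧
      (∀ j : Nat, (pvPop nums i arr st).1.getD j 0 =
        if j ∈ st ∧ nums.getD j 0 < nums.getD i 0 then (i : Int) else arr.getD j 0) := by
  intro st
  induction st with
  | nil =>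
    intro arr _ _
    refine ⟨rfl, rfl, fun j => ?_⟩
    rw [if_neg (by rintro ⟨h, -⟩; exact (List.not_mem_nil h).elim)]
    rfl
  | cons t rest ih =>
    intro arr hp hlen
    rcases List.pairwise_cons.mp hp with ⟨ht, hrest⟩
    by_cases hv : nums.getD t 0 < nums.getD i 0
    · have hstep : pvPop nums i arr (t :: rest) = pvPop nums i (arr.set t (i : Int)) rest := by
        simp only [pvPop, if_pos hv]
      have hlen' : ∀ u ∈ rest, u < (arr.set t (i : Int)).length := by
        intro u hu; rw [List.length_set]; exact hlen u (List.mem_cons_of_mem t hu)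
      obtain ⟨h1, h2, h3⟩ := ih (arr.set t (i : Int)) hrest hlen'
      rw [hstep]
      refine ⟨?_, ?_, ?_⟩
      · rw [h1, List.filter_cons, if_neg (by simpa using hv)]
      · rw [h2, List.length_set]
      · intro j
        rw [h3 j]
        by_cases hjt : j = t
        · subst hjt
          have hjr : j ∉ rest := fun hm => (ht j hm).1 rfl
          rw [if_neg (by rintro ⟨hm, -⟩; exact hjr hm),
            if_pos ⟨List.mem_cons_self, hv⟩,
            pvGetD_set_self arr j (i : Int) (hlen j List.mem_cons_self)]
        · rw [pvGetD_set_ne arr t j (i : Int) hjt]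
          by_cases hjm : j ∈ rest ∧ nums.getD j 0 < nums.getD i 0
          · rw [if_pos hjm, if_pos ⟨List.mem_cons_of_mem t hjm.1, hjm.2⟩]
          · rw [if_neg hjm, if_neg (by
              rintro ⟨hm, hlt⟩
              rcases List.mem_cons.mp hm with rfl | hm'
              · exact hjt rfl
              · exact hjm ⟨hm', hlt⟩)]
    · have hstep : pvPop nums i arr (t :: rest) = (arr, t :: rest) := by
        simp only [pvPop, if_neg hv]
      rw [hstep]
      refine ⟨?_, rfl, ?_⟩
      · symm
        apply List.filter_eq_self.mpr
        intro x hx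
        rcases List.mem_cons.mp hx with rfl | hx'
        · simpa using not_lt.mp hv
        · simpa using le_trans (not_lt.mp hv) (ht x hx').2
      · intro j
        rw [if_neg ?_]
        rintro ⟨hm, hlt⟩
        rcases List.mem_cons.mp hm with rfl | hm'
        · exact hv hlt
        · exact absurd hlt (not_lt.mpr (le_trans (not_lt.mp hv) (ht j hm').2))

def pvInv1 (nums : List Int) (i : Nat) (s : List Int × List Nat) : Prop :=
  s.1.length = nums.length ∧
  (∀ j : Nat, j ∈ s.2 ↔ (j < i ∧ ∀ k, j < k → k < i → nums.getD k 0 ≤ nums.getD j 0)) ∧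
  List.Pairwise (fun a b => a ≠ b ∧ nums.getD a 0 ≤ nums.getD b 0) s.2 ∧
  (∀ j : Nat, j < nums.length →
    s.1.getD j 0 = ((pvNgB nums (nums.getD j 0) (j + 1) i : Nat) : Int))

theorem pvPass1 (nums : List Int) :
    ∀ i, i ≤ nums.length →
      pvInv1 nums i ((List.range i).foldl (pvStep nums)
        (List.replicate nums.length (nums.length : Int), [])) := by
  intro i
  induction i with
  | zero =>
    intro _
    refine ⟨by simp, by simp, by simp, fun j hj => ?_⟩
    rw [pvNgB_of_ge nums _ (j + 1) 0 (by omega)]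
    simp [List.getD_eq_getElem?_getD, hj]
  | succ i ih =>
    intro hi1
    have hi : i < nums.length := by omega
    obtain ⟨hlen, hmem, hpair, hval⟩ := ih (by omega)
    set s := (List.range i).foldl (pvStep nums) (List.replicate nums.length (nums.length : Int), [])
      with hs
    rw [List.range_succ, List.foldl_append]
    obtain ⟨hs2, hslen, hsval⟩ := pvPop_spec nums i s.2 s.1 hpair
      (fun t htm => by rw [hlen]; exact lt_trans ((hmem t).mp htm).1 hi)
    show pvInv1 nums (i + 1) (pvStep nums s i)
    refine ⟨?_, ?_, ?_, ?_⟩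
    · show (pvPop nums i s.1 s.2).1.length = nums.length
      rw [hslen, hlen]
    · show ∀ j : Nat, j ∈ i :: (pvPop nums i s.1 s.2).2 ↔ _
      intro j
      rw [hs2]
      constructor
      · intro hj
        rcases List.mem_cons.mp hj with rfl | hjf
        · exact ⟨by omega, fun k h1 h2 => by omega⟩
        · rcases List.mem_filter.mp hjf with ⟨hjs, hpj⟩
          rcases (hmem j).mp hjs with ⟨hji, hw⟩
          refine ⟨by omega, fun k h1 h2 => ?_⟩
          rcases Nat.lt_or_ge k i with hk | hk
          · exact hw k h1 hk
          · have : k = i := by omega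
            subst this
            exact le_of_not_gt (by simpa using hpj)
      · rintro ⟨hj1, hw⟩
        rcases Nat.lt_or_ge j i with hji | hji
        · refine List.mem_cons_of_mem i (List.mem_filter.mpr ⟨(hmem j).mpr
            ⟨hji, fun k h1 h2 => hw k h1 (by omega)⟩, by simpa using hw i hji (by omega)⟩)
        · have : j = i := by omega
          subst this
          exact List.mem_cons_self
    · show List.Pairwise _ (i :: (pvPop nums i s.1 s.2).2)
      rw [hs2]
      refine List.pairwise_cons.mpr ⟨?_, hpair.filter _⟩
      intro b hb
      rcases List.mem_filter.mp hb with ⟨hbs, hpb⟩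
      exact ⟨fun he => by exact absurd ((hmem b).mp hbs).1 (by omega), by simpa using hpb⟩
    · show ∀ j : Nat, j < nums.length → (pvPop nums i s.1 s.2).1.getD j 0 = _
      intro j hj
      rw [hsval j]
      by_cases hc : j ∈ s.2 ∧ nums.getD j 0 < nums.getD i 0
      · rcases (hmem j).mp hc.1 with ⟨hji, hw⟩
        rw [if_pos hc]
        rw [pvNgB_found nums (nums.getD j 0) (j + 1) i
          (fun m h1 h2 => hw m (by omega) h2) (by omega) (by omega) hc.2]
      · rw [if_neg hc, hval j hj]
        rcases Nat.lt_or_ge j i with hji | hji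
        · rw [pvNgB_succ nums (nums.getD j 0) (j + 1) i (by omega) (by omega)]
          by_cases hnull : pvNgB nums (nums.getD j 0) (j + 1) i = nums.length
          · rw [if_pos hnull]
            have hjs : j ∈ s.2 := (hmem j).mpr ⟨hji, fun k h1 h2 =>
              pvNgB_window nums (nums.getD j 0) (j + 1) i k (by omega) h2 (by omega)⟩
            rw [if_neg (fun hlt => hc ⟨hjs, hlt⟩), hnull]
          · rw [if_neg hnull]
        · rw [pvNgB_of_ge nums _ (j + 1) i (by omega),
            pvNgB_of_ge nums _ (j + 1) (i + 1) (by omega)]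

def pvInv2 (nums : List Int) (b : Nat) (s : List Int × List Nat) : Prop :=
  s.1.length = nums.length ∧
  (∀ j : Nat, j ∈ s.2 ↔ (b ≤ j ∧ j < nums.length ∧
    ∀ k, b ≤ k → k < j → nums.getD k 0 ≤ nums.getD j 0)) ∧
  List.Pairwise (fun a b => a ≠ b ∧ nums.getD a 0 ≤ nums.getD b 0) s.2 ∧
  (∀ j : Nat, j < nums.length → s.1.getD j 0 = pvPgB nums (nums.getD j 0) j b)

theorem pvPass2 (nums : List Int) :
    ∀ c, c ≤ nums.length →
      pvInv2 nums (nums.length - c) (((List.range' (nums.length - c) c).reverse).foldl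
        (pvStep nums) (List.replicate nums.length (-1 : Int), [])) := by
  intro c
  induction c with
  | zero =>
    intro _
    refine ⟨by simp, ?_, by simp, fun j hj => ?_⟩
    · intro j
      constructor
      · intro h
        exact absurd h List.not_mem_nil
      · rintro ⟨h1, h2, -⟩
        omega
    · rw [pvPgB_of_le nums _ j (nums.length - 0) (by omega)]
      simp [List.getD_eq_getElem?_getD, hj]
  | succ c ih =>
    intro hc1
    obtain ⟨hlen, hmem, hpair, hval⟩ := ih (by omega)
    set a := nums.length - (c + 1) with ha
    have han : a < nums.length := by omega
    have hb : nums.length - c = a + 1 := by omega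
    set s := ((List.range' (nums.length - c) c).reverse).foldl (pvStep nums)
      (List.replicate nums.length (-1 : Int), []) with hs
    rw [hb] at hmem hval
    have hrange : (List.range' a (c + 1)).reverse =
        (List.range' (nums.length - c) c).reverse ++ [a] := by
      rw [show List.range' a (c + 1) = a :: List.range' (a + 1) c by
        rw [List.range'_succ], List.reverse_cons, hb]
    rw [hrange, List.foldl_append, ← hs]
    obtain ⟨hs2, hslen, hsval⟩ := pvPop_spec nums a s.2 s.1 hpair
      (fun t htm => by rw [hlen]; exact ((hmem t).mp htm).2.1)
    show pvInv2 nums a (pvStep nums s a)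
    refine ⟨?_, ?_, ?_, ?_⟩
    · show (pvPop nums a s.1 s.2).1.length = nums.length
      rw [hslen, hlen]
    · show ∀ j : Nat, j ∈ a :: (pvPop nums a s.1 s.2).2 ↔ _
      intro j
      rw [hs2]
      constructor
      · intro hj
        rcases List.mem_cons.mp hj with rfl | hjf
        · exact ⟨le_refl _, han, fun k h1 h2 => by omega⟩
        · rcases List.mem_filter.mp hjf with ⟨hjs, hpj⟩
          rcases (hmem j).mp hjs with ⟨hj1, hj2, hw⟩
          refine ⟨by omega, hj2, fun k h1 h2 => ?_⟩
          rcases Nat.lt_or_ge a k with hk | hk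
          · exact hw k (by omega) h2
          · have : k = a := by omega
            subst this
            exact le_of_not_gt (by simpa using hpj)
      · rintro ⟨hj1, hj2, hw⟩
        rcases Nat.lt_or_ge a j with hja | hja
        · refine List.mem_cons_of_mem a (List.mem_filter.mpr ⟨(hmem j).mpr
            ⟨by omega, hj2, fun k h1 h2 => hw k (by omega) h2⟩,
            by simpa using hw a (le_refl _) hja⟩)
        · have : j = a := by omega
          subst this
          exact List.mem_cons_self
    · show List.Pairwise _ (a :: (pvPop nums a s.1 s.2).2)
      rw [hs2]
      refine List.pairwise_cons.mpr ⟨?_, hpair.filter _⟩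
      intro b hbm
      rcases List.mem_filter.mp hbm with ⟨hbs, hpb⟩
      exact ⟨fun he => by exact absurd ((hmem b).mp hbs).1 (by omega), by simpa using hpb⟩
    · show ∀ j : Nat, j < nums.length → (pvPop nums a s.1 s.2).1.getD j 0 = _
      intro j hj
      rw [hsval j]
      by_cases hcnd : j ∈ s.2 ∧ nums.getD j 0 < nums.getD a 0
      · rcases (hmem j).mp hcnd.1 with ⟨hj1, hj2, hw⟩
        rw [if_pos hcnd]
        rw [pvPgB_found nums (nums.getD j 0) j a
          (fun m h1 h2 => hw m h1 h2) (by omega) hcnd.2]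
      · rw [if_neg hcnd, hval j hj, pvPgB_pred nums (nums.getD j 0) j a]
        by_cases hnull : pvPgB nums (nums.getD j 0) j (a + 1) = -1
        · rw [if_pos hnull, hnull]
          by_cases hcnd2 : a < j ∧ nums.getD j 0 < nums.getD a 0
          · exfalso
            have hjs : j ∈ s.2 := (hmem j).mpr ⟨by omega, hj, fun k h1 h2 =>
              pvPgB_window nums (nums.getD j 0) j (a + 1) k h1 h2 (by rw [hnull]; omega)⟩
            exact hcnd ⟨hjs, hcnd2.2⟩
          · rw [if_neg hcnd2]
        · rw [if_neg hnull]

theorem jumpPrev_succ (nums prev : List Int) (vi x : Int) (f : Nat) :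
    jumpPrev nums prev vi x (f + 1) =
      if 0 ≤ x ∧ nums.getD x.toNat 0 ≤ vi then jumpPrev nums prev vi (prev.getD x.toNat 0) f
      else x := rfl

theorem jumpNext_succ (nums nxt : List Int) (vi x : Int) (f : Nat) :
    jumpNext nums nxt vi x (f + 1) =
      if x < (nums.length : Int) ∧ nums.getD x.toNat 0 ≤ vi then
        jumpNext nums nxt vi (nxt.getD x.toNat 0) f
      else x := rfl

theorem pvJumpPrev_spec (nums : List Int) (i : Nat) :
    ∀ (fuel : Nat) (x : Int) (prev : List Int),
      (∀ j : Nat, j < i → prev.getD j 0 = pvPgB nums (nums.getD j 0) j 0) →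
      -1 ≤ x → x < (i : Int) →
      (∀ k : Nat, x < (k : Int) → k < i → nums.getD k 0 ≤ nums.getD i 0) →
      (x + 1).toNat < fuel →
      jumpPrev nums prev (nums.getD i 0) x fuel = pvPgB nums (nums.getD i 0) i 0 := by
  intro fuel
  induction fuel with
  | zero =>
    intro x prev _ _ _ _ hf
    omega
  | succ f ih =>
    intro x prev hprev hx1 hxi hw hf
    rw [jumpPrev_succ]
    by_cases hgo : 0 ≤ x ∧ nums.getD x.toNat 0 ≤ nums.getD i 0
    · rw [if_pos hgo]
      have hxn : x.toNat < i := by omega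
      have hx' : prev.getD x.toNat 0 = pvPgB nums (nums.getD x.toNat 0) x.toNat 0 :=
        hprev x.toNat hxn
      have hlt : pvPgB nums (nums.getD x.toNat 0) x.toNat 0 < (x.toNat : Int) :=
        pvPgB_lt nums _ x.toNat 0
      have hge : -1 ≤ pvPgB nums (nums.getD x.toNat 0) x.toNat 0 :=
        pvPgB_neg_one_le nums _ x.toNat 0
      rw [hx']
      apply ih _ prev hprev hge (by omega)
      · intro k h1 h2
        rcases Nat.lt_trichotomy k x.toNat with hk | hk | hk
        · exact le_trans (pvPgB_window nums (nums.getD x.toNat 0) x.toNat 0 k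
            (by omega) hk (by omega)) hgo.2
        · subst hk
          exact hgo.2
        · exact hw k (by omega) h2
      · omega
    · rw [if_neg hgo]
      by_cases hx0 : 0 ≤ x
      · have hv : nums.getD i 0 < nums.getD x.toNat 0 := by
          rcases not_and_or.mp hgo with h | h
          · exact absurd hx0 h
          · omega
        rw [pvPgB_uniq_found nums (nums.getD i 0) i 0 x.toNat (by omega) (by omega) hv
          (fun m h1 h2 => hw m (by omega) h2)]
        omega
      · have hx : x = -1 := by omega
        subst hx
        rw [pvPgB_none nums (nums.getD i 0) i 0
          (fun m h1 h2 => hw m (by omega) h2)]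

theorem pvJumpNext_spec (nums : List Int) (i : Nat) :
    ∀ (fuel : Nat) (x : Int) (nxt : List Int),
      (∀ j : Nat, i < j → j < nums.length →
        nxt.getD j 0 = ((pvNgB nums (nums.getD j 0) (j + 1) nums.length : Nat) : Int)) →
      (i : Int) < x → x ≤ (nums.length : Int) →
      (∀ k : Nat, i < k → (k : Int) < x → nums.getD k 0 ≤ nums.getD i 0) →
      nums.length - x.toNat < fuel →
      jumpNext nums nxt (nums.getD i 0) x fuel =
        ((pvNgB nums (nums.getD i 0) (i + 1) nums.length : Nat) : Int) := by
  intro fuel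
  induction fuel with
  | zero =>
    intro x nxt _ _ _ _ hf
    omega
  | succ f ih =>
    intro x nxt hnxt hxi hxn hw hf
    rw [jumpNext_succ]
    by_cases hgo : x < (nums.length : Int) ∧ nums.getD x.toNat 0 ≤ nums.getD i 0
    · rw [if_pos hgo]
      have hx0 : 0 ≤ x := by omega
      have hxin : i < x.toNat ∧ x.toNat < nums.length := by omega
      have hx' : nxt.getD x.toNat 0 =
          ((pvNgB nums (nums.getD x.toNat 0) (x.toNat + 1) nums.length : Nat) : Int) :=
        hnxt x.toNat hxin.1 hxin.2
      rw [hx']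
      rcases pvNgB_mem nums (nums.getD x.toNat 0) (x.toNat + 1) nums.length with hm | ⟨h1, h2, h3⟩
      · rw [hm]
        apply ih _ nxt hnxt (by omega) (by omega)
        · intro k hk1 hk2
          rcases Nat.lt_trichotomy k x.toNat with hkx | hkx | hkx
          · exact hw k hk1 (by omega)
          · subst hkx
            exact hgo.2
          · exact le_trans (pvNgB_window nums (nums.getD x.toNat 0) (x.toNat + 1)
              nums.length k (by omega) (by omega) (by omega)) hgo.2
        · omega
      · apply ih _ nxt hnxt (by omega) (by omega)
        · intro k hk1 hk2
          rcases Nat.lt_trichotomy k x.toNat with hkx | hkx | hkx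
          · exact hw k hk1 (by omega)
          · subst hkx
            exact hgo.2
          · exact le_trans (pvNgB_window nums (nums.getD x.toNat 0) (x.toNat + 1)
              nums.length k (by omega) (by omega) (by omega)) hgo.2
        · omega
    · rw [if_neg hgo]
      by_cases hxl : x < (nums.length : Int)
      · have hv : nums.getD i 0 < nums.getD x.toNat 0 := by
          rcases not_and_or.mp hgo with h | h
          · exact absurd hxl h
          · omega
        rw [pvNgB_uniq_found nums (nums.getD i 0) (i + 1) nums.length x.toNat (le_refl _)
          (by omega) (by omega) hv (fun m h1 h2 => hw m (by omega) (by omega))]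
        omega
      · have hx : x = (nums.length : Int) := by omega
        subst hx
        rw [pvNgB_none nums (nums.getD i 0) (i + 1) nums.length
          (fun m h1 h2 => hw m (by omega) (by omega))]

theorem pvBPrev (nums : List Int) :
    ∀ i, i ≤ nums.length →
      ((List.range i).foldl (pvStepPrev nums) (List.replicate nums.length (-1 : Int))).length
          = nums.length ∧
      (∀ j : Nat, j < nums.length →
        ((List.range i).foldl (pvStepPrev nums) (List.replicate nums.length (-1 : Int))).getD j 0 =
          if j < i then pvPgB nums (nums.getD j 0) j 0 else -1) := by
  intro i
  induction i with
  | zero =>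
    intro _
    refine ⟨by simp, fun j hj => ?_⟩
    rw [if_neg (by omega)]
    simp [List.getD_eq_getElem?_getD, hj]
  | succ i ih =>
    intro hi1
    have hi : i < nums.length := by omega
    obtain ⟨hlen, hval⟩ := ih (by omega)
    set prev := (List.range i).foldl (pvStepPrev nums) (List.replicate nums.length (-1 : Int))
      with hp
    rw [List.range_succ, List.foldl_append]
    simp only [List.foldl_cons, List.foldl_nil]
    have hjump : jumpPrev nums prev (nums.getD i 0) ((i : Int) - 1) (nums.length + 1) =
        pvPgB nums (nums.getD i 0) i 0 := by
      apply pvJumpPrev_spec nums i (nums.length + 1) ((i : Int) - 1) prev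
        (fun j hj => by rw [hval j (by omega), if_pos hj]) (by omega) (by omega)
        (fun k h1 h2 => by omega) (by omega)
    show (pvStepPrev nums prev i).length = nums.length ∧ _
    constructor
    · simp only [pvStepPrev]
      rw [List.length_set, hlen]
    · intro j hj
      simp only [pvStepPrev]
      rw [hjump]
      by_cases hji : j = i
      · rw [hji, pvGetD_set_self prev i _ (by omega), if_pos (by omega)]
      · rw [pvGetD_set_ne prev i j _ hji, hval j hj]
        by_cases hjlt : j < i
        · rw [if_pos hjlt, if_pos (by omega)]
        · rw [if_neg hjlt, if_neg (by omega)]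

theorem pvBNext (nums : List Int) :
    ∀ c, c ≤ nums.length →
      (((List.range' (nums.length - c) c).reverse).foldl (pvStepNext nums)
          (List.replicate nums.length (nums.length : Int))).length = nums.length ∧
      (∀ j : Nat, j < nums.length →
        (((List.range' (nums.length - c) c).reverse).foldl (pvStepNext nums)
          (List.replicate nums.length (nums.length : Int))).getD j 0 =
          if nums.length - c ≤ j then ((pvNgB nums (nums.getD j 0) (j + 1) nums.length : Nat) : Int)
          else (nums.length : Int)) := by
  intro c
  induction c with
  | zero =>
    intro _
    refine ⟨by simp, fun j hj => ?_⟩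
    rw [if_neg (by omega)]
    simp [List.getD_eq_getElem?_getD, hj]
  | succ c ih =>
    intro hc1
    obtain ⟨hlen, hval⟩ := ih (by omega)
    set a := nums.length - (c + 1) with ha
    have han : a < nums.length := by omega
    have hb : nums.length - c = a + 1 := by omega
    set nxt := ((List.range' (nums.length - c) c).reverse).foldl (pvStepNext nums)
      (List.replicate nums.length (nums.length : Int)) with hn
    rw [hb] at hval
    have hrange : (List.range' a (c + 1)).reverse =
        (List.range' (nums.length - c) c).reverse ++ [a] := by
      rw [show List.range' a (c + 1) = a :: List.range' (a + 1) c by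
        rw [List.range'_succ], List.reverse_cons, hb]
    rw [hrange, List.foldl_append, ← hn]
    simp only [List.foldl_cons, List.foldl_nil]
    have hjump : jumpNext nums nxt (nums.getD a 0) ((a : Int) + 1) (nums.length + 1) =
        ((pvNgB nums (nums.getD a 0) (a + 1) nums.length : Nat) : Int) := by
      apply pvJumpNext_spec nums a (nums.length + 1) ((a : Int) + 1) nxt
        (fun j h1 h2 => by rw [hval j h2, if_pos (by omega)]) (by omega) (by omega)
        (fun k h1 h2 => by omega) (by omega)
    show (pvStepNext nums nxt a).length = nums.length ∧ _
    constructor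
    · simp only [pvStepNext]
      rw [List.length_set, hlen]
    · intro j hj
      simp only [pvStepNext]
      rw [hjump]
      by_cases hja : j = a
      · rw [hja, pvGetD_set_self nxt a _ (by omega), if_pos (by omega)]
      · rw [pvGetD_set_ne nxt a j _ hja, hval j hj]
        by_cases hjge : a + 1 ≤ j
        · rw [if_pos hjge, if_pos (by omega)]
        · rw [if_neg hjge, if_neg (by omega)]

theorem pvMain (nums : List Int) : maximumLengthOfRanges nums = maximumLengthOfRanges_alt nums := by
  obtain ⟨-, -, -, hA1⟩ := pvPass1 nums nums.length (le_refl _)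
  have h2 := pvPass2 nums nums.length (le_refl _)
  rw [Nat.sub_self, ← List.range_eq_range'] at h2
  obtain ⟨-, -, -, hA2⟩ := h2
  obtain ⟨-, hBp⟩ := pvBPrev nums nums.length (le_refl _)
  have hn := pvBNext nums nums.length (le_refl _)
  rw [Nat.sub_self, ← List.range_eq_range'] at hn
  obtain ⟨-, hBn⟩ := hn
  simp only [maximumLengthOfRanges, maximumLengthOfRanges_alt]
  apply List.map_congr_left
  intro i hi
  have hin : i < nums.length := List.mem_range.mp hi
  rw [hA1 i hin, hA2 i hin, hBn i hin, hBp i hin, if_pos hin, if_pos (by omega)]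

-- ===== VERDICT (by name: the statement is the Claim_ definition above) =====
theorem maximumLengthOfRanges_spec : Claim_equal_maximumLengthOfRanges := by
  intro nums _
  unfold Spec_maximumLengthOfRanges
  exact pvMain nums
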